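-- pv_equiv track=rewrite | github.com/alan-turing-institute/advent-of-code-2023 | day-05/python_jackr/day05.py | _get_single_destination_range
-- ===== SOURCE A (Python) =====
-- def in_range(idx, start, size):
--     return start <= idx < start + size
--
-- def _get_single_destination_range(query_range, mapping):
--     # (source start ID, length of range) -> list of (destination start ID, length of range)
--
--     # extract query parameters [the source IDs we want to find]
--     query_src_start, query_src_size = query_range
--     query_src_end = query_src_start + query_src_size
--
--     # match_ranges stores the destination ranges that match the query
--     # (list of [(destination start id, range length)])
--     match_ranges = []
--
--     for m in mapping:  # (the ranges in mapping are ordered by src start id)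
--         # extract parameters for this map (which we'll check for overlaps with the query)
--         map_dest_start, map_src_start, map_size = m
--         map_src_end = map_src_start + map_size
--
--         if query_src_start < map_src_start:
--             # the query starts before the mapping, so map to same destination id as src
--             # id (until the end of the query or the start of the map)
--             match_ranges.append(
--                 [query_src_start, min([map_src_start, query_src_end]) - query_src_start]
--             )
--             if query_src_end <= map_src_start:
--                 # reached the end of the query so don't need to keep searching
--                 return match_ranges
--             else:
--                 # move the start of the query (then progress to overlap logic below)
--                 query_src_start = map_src_start
--
--         if in_range(query_src_start, map_src_start, map_size):
--             # the (remaining) query overlaps with this mapping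
--             # compute the start ID of the destination range based on the src IDs
--             query_dest_start = map_dest_start + (query_src_start - map_src_start)
--
--             if query_src_end <= map_src_end:
--                 # all of the remaining query fits in this mapping, store the matching
--                 # destination range and then we've finished processing the query
--                 range_size = query_src_end - query_src_start
--                 match_ranges.append([query_dest_start, range_size])
--                 return match_ranges
--             else:
--                 # part of the remaining query fits in this mapping, store the matching
--                 # destination range then continue and search the next mapping with
--                 # the remainder of the query
--                 range_size = map_src_end - query_src_start
--                 match_ranges.append([query_dest_start, range_size])
--                 query_src_start = map_src_end
--
--     # the query extends above the max defined mapping, so the remaining destination ids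
--     # will match the src ids
--     match_ranges.append([query_src_start, query_src_end - query_src_start])
--
--     return match_ranges
-- ===== SOURCE B (Python) =====
-- # B: recursive interval-splitting decomposition; at each mapping entry clip the
-- # query into (before, inside) pieces with min/max arithmetic and recurse on the rest.
-- def _get_single_destination_range(query_range, mapping):
--     start, size = query_range
--     return _split(start, start + size, mapping)
--
-- def _split(start, end, mapping):
--     if not mapping:
--         return [[start, end - start]]
--     (dest, src, sz), rest = mapping[0], mapping[1:]
--     src_end = src + sz
--     out = []
--     if start < src:
--         out.append([start, min(src, end) - start])
--         if end <= src:
--             return out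
--         start = src
--     if start < src_end:
--         out.append([dest + (start - src), min(end, src_end) - start])
--         if end <= src_end:
--             return out
--         start = src_end
--     return out + _split(start, end, rest)
-- ===== Notes on version B (the rewrite author's own statement) =====
-- stated objective: simpler
-- what changed: Replaces A's mutating-pointer loop with early returns and the in_range helper by a recursive interval-splitting function that clips the query against each mapping entry into (before, inside) pieces via min/max arithmetic and recurses on the remaining mappings.
import Mathlib
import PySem

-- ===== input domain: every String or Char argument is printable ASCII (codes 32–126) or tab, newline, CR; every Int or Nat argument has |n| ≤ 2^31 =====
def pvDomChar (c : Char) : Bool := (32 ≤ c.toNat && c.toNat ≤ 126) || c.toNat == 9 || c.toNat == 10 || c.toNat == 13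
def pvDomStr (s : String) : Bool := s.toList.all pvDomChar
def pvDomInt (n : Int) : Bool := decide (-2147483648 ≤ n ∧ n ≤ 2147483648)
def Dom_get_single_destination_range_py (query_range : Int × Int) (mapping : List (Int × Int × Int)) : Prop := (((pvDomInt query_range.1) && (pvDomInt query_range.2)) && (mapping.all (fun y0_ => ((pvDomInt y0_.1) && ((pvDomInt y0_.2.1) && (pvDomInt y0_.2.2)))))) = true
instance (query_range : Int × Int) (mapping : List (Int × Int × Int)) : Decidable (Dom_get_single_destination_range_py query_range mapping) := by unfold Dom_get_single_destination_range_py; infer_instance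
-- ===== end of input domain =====

-- B replaces A's mutating-pointer loop (with in_range and early returns) by a recursive
-- interval-splitting function clipping the query with min/max arithmetic; objective: simpler.

-- ===== PORT A =====
-- helper in_range(idx, start, size)
def in_range_py (idx start size : Int) : Bool := decide (start ≤ idx ∧ idx < start + size)

-- A's for-loop over `mapping` with mutable query_src_start, accumulator match_ranges
-- and early returns, transcribed as structural recursion carrying (qs, acc).
def goA (qe : Int) (qs : Int) (acc : List (List Int)) : List (Int × Int × Int) → List (List Int)
  | [] => acc ++ [[qs, qe - qs]]
  | (map_dest_start, map_src_start, map_size) :: rest =>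
    let map_src_end := map_src_start + map_size
    -- "if query_src_start < map_src_start:"
    let st := if qs < map_src_start then
        (acc ++ [[qs, min map_src_start qe - qs]], map_src_start, decide (qe ≤ map_src_start))
      else (acc, qs, false)
    if st.2.2 then st.1  -- "return match_ranges"
    else
      let acc := st.1
      let qs := st.2.1
      if in_range_py qs map_src_start map_size then
        let query_dest_start := map_dest_start + (qs - map_src_start)
        if qe ≤ map_src_end then acc ++ [[query_dest_start, qe - qs]]
        else goA qe map_src_end (acc ++ [[query_dest_start, map_src_end - qs]]) rest
      else goA qe qs acc rest

def get_single_destination_range_py (query_range : Int × Int) (mapping : List (Int × Int × Int)) : List (List Int) :=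
  goA (query_range.1 + query_range.2) query_range.1 [] mapping

-- ===== PORT B =====
-- Source B's _split: clip the query against the head mapping entry, recurse on the rest.
def goB (qe : Int) (start : Int) : List (Int × Int × Int) → List (List Int)
  | [] => [[start, qe - start]]
  | (dest, src, sz) :: rest =>
    let src_end := src + sz
    if start < src then
      let out := [[start, min src qe - start]]
      if qe ≤ src then out
      else
        -- start = src; second clip
        if src < src_end then
          let out2 := out ++ [[dest, min qe src_end - src]]
          if qe ≤ src_end then out2 else out2 ++ goB qe src_end rest
        else out ++ goB qe src rest
    else
      if start < src_end then
        let out2 := [[dest + (start - src), min qe src_end - start]]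
        if qe ≤ src_end then out2 else out2 ++ goB qe src_end rest
      else goB qe start rest

def get_single_destination_range_py_alt (query_range : Int × Int) (mapping : List (Int × Int × Int)) : List (List Int) :=
  goB (query_range.1 + query_range.2) query_range.1 mapping

-- ===== PRECONDITION & SPEC =====
def Spec_get_single_destination_range_py (query_range : Int × Int) (mapping : List (Int × Int × Int)) (out : List (List Int)) : Prop := out = get_single_destination_range_py_alt query_range mapping
instance (query_range : Int × Int) (mapping : List (Int × Int × Int)) (out : List (List Int)) : Decidable (Spec_get_single_destination_range_py query_range mapping out) := by unfold Spec_get_single_destination_range_py; infer_instance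

-- ===== CLAIM (what is proved, stated in full; the proofs are below) =====
def Claim_equal_get_single_destination_range_py : Prop := ∀ (query_range : Int × Int) (mapping : List (Int × Int × Int)), Dom_get_single_destination_range_py query_range mapping → Spec_get_single_destination_range_py query_range mapping (get_single_destination_range_py query_range mapping)

-- ===== LEMMAS AND PROOFS =====

theorem goA_eq_goB (qe : Int) (ms : List (Int × Int × Int)) :
    ∀ (qs : Int) (acc : List (List Int)), goA qe qs acc ms = acc ++ goB qe qs ms := by
  induction ms with
  | nil => intro qs acc; simp [goA, goB]
  | cons m rest ih =>
    intro qs acc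
    obtain ⟨d, s, sz⟩ := m
    simp only [goA, goB, in_range_py]
    by_cases h1 : qs < s
    · by_cases h2 : qe ≤ s
      · simp [h1, h2]
      · by_cases h3 : s < s + sz
        · have hir : s ≤ s ∧ s < s + sz := ⟨le_rfl, h3⟩
          by_cases h4 : qe ≤ s + sz
          · have hm : min qe (s + sz) = qe := by omega
            simp [h1, h2, h3, h4]
          · have hm : min qe (s + sz) = s + sz := by omega
            simp [h1, h2, h3, h4, hm, ih]
        · simp [h1, h2, h3, ih]
    · by_cases h3 : qs < s + sz
      · have hir : s ≤ qs ∧ qs < s + sz := ⟨by omega, h3⟩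
        by_cases h4 : qe ≤ s + sz
        · have hm : min qe (s + sz) = qe := by omega
          simp [h1, h3, h4, hir]
        · have hm : min qe (s + sz) = s + sz := by omega
          simp [h1, h3, h4, hm, hir, ih]
      · simp [h1, h3, ih]

-- ===== VERDICT (by name: the statement is the Claim_ definition above) =====
theorem get_single_destination_range_py_spec : Claim_equal_get_single_destination_range_py := by
  intro q m _
  unfold Spec_get_single_destination_range_py get_single_destination_range_py get_single_destination_range_py_alt
  simpa using goA_eq_goB (q.1 + q.2) m q.1 []
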